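-- pv_equiv track=rewrite | github.com/RESMP-DEV/metal-marlin | metal_marlin/trellis_loader.py | _detect_trellis_format
-- ===== SOURCE A (Python) =====
-- def _detect_trellis_format(tensor_dict: dict) -> str:
--     """Detect trellis tensor format.
--
--     Returns:
--         "metal_marlin": Our format with __indices, __scales, __su, __sv
--         "exllamav3": ExllamaV3 format with .scale, .zero_point, etc.
--         "unknown": Unrecognized format
--     """
--     sample_keys = list(tensor_dict.keys())[:20]
--
--     # Our format
--     if any("__indices" in k for k in sample_keys):
--         return "metal_marlin"
--
--     # ExllamaV3 format
--     if any(".qweight" in k for k in sample_keys):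
--         return "exllamav3_gptq"
--     if any(".scale" in k for k in sample_keys) and any(".zero_point" in k for k in sample_keys):
--         return "exllamav3_exl2"
--
--     # Check for trellis indices in different naming
--     if any("trellis" in k.lower() for k in sample_keys):
--         return "exllamav3_trellis"
--
--     return "unknown"
-- ===== SOURCE B (Python) =====
-- _BIT_PATTERNS = ("__indices", ".qweight", ".scale", ".zero_point")
--
--
-- def _key_mask(k):
--     """5-bit fingerprint of one key: one bit per pattern, bit 4 for 'trellis'."""
--     m = 0
--     for i, p in enumerate(_BIT_PATTERNS):
--         if p in k:
--             m |= 1 << i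
--     if "trellis" in k.lower():
--         m |= 16
--     return m
--
--
-- def _format_for(mask):
--     if mask & 1:
--         return "metal_marlin"
--     if mask & 2:
--         return "exllamav3_gptq"
--     if mask & 12 == 12:
--         return "exllamav3_exl2"
--     if mask & 16:
--         return "exllamav3_trellis"
--     return "unknown"
--
--
-- # precomputed once: format name for every possible combined 5-bit mask
-- _FORMAT_TABLE = tuple(_format_for(m) for m in range(32))
--
--
-- def _detect_trellis_format(tensor_dict: dict) -> str:
--     """Detect trellis tensor format via a bitmask fingerprint and a 32-entry table."""
--     mask = 0
--     for k in list(tensor_dict.keys())[:20]: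
--         mask |= _key_mask(k)
--     return _FORMAT_TABLE[mask]
-- ===== Notes on version B (the rewrite author's own statement) =====
-- stated objective: alternative
-- what changed: B fingerprints each sampled key as a 5-bit mask, ORs the masks in one fold, and decodes the combined mask through a precomputed 32-entry lookup table, instead of A's ordered sequence of any()-substring scans with explicit branching.
import Mathlib
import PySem

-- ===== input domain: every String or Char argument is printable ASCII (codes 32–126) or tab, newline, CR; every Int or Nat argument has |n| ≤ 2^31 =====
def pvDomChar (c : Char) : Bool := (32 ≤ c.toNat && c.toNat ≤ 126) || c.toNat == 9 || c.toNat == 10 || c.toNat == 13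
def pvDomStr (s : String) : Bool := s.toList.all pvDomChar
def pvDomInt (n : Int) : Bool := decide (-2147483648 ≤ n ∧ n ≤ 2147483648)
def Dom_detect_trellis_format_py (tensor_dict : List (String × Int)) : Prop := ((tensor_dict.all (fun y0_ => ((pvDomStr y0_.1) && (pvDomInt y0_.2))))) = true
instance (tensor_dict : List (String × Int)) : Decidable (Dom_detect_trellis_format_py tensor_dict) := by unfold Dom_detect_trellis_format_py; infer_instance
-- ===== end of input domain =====

-- B replaces A's ordered any()-substring scans by a bitmask fingerprint per key,
-- OR-folded over the sampled keys and decoded via a precomputed 32-entry table (alternative decomposition, same cost).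

-- ===== PORT A =====
def detect_trellis_format_py (tensor_dict : List (String × Int)) : String :=
  let sample_keys := PySem.List.slice (tensor_dict.map Prod.fst) none (some 20)
  if sample_keys.any (fun k => PySem.Str.isIn "__indices" k) then "metal_marlin"
  else if sample_keys.any (fun k => PySem.Str.isIn ".qweight" k) then "exllamav3_gptq"
  else if sample_keys.any (fun k => PySem.Str.isIn ".scale" k) &&
          sample_keys.any (fun k => PySem.Str.isIn ".zero_point" k) then "exllamav3_exl2"
  else if sample_keys.any (fun k => PySem.Str.isIn "trellis" (PySem.Str.lower k)) then "exllamav3_trellis"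
  else "unknown"

-- ===== PORT B =====
-- Source B's _key_mask: fold over the enumerated pattern tuple, then the trellis bit
def key_mask (k : String) : Nat :=
  let m := ([(0, "__indices"), (1, ".qweight"), (2, ".scale"), (3, ".zero_point")] :
      List (Nat × String)).foldl
    (fun m ip => if PySem.Str.isIn ip.2 k then m ||| (1 <<< ip.1) else m) 0
  if PySem.Str.isIn "trellis" (PySem.Str.lower k) then m ||| 16 else m

-- Source B's _format_for (Python truthiness of `mask & b` is `≠ 0`)
def format_for (mask : Nat) : String :=
  if mask &&& 1 ≠ 0 then "metal_marlin"
  else if mask &&& 2 ≠ 0 then "exllamav3_gptq"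
  else if mask &&& 12 = 12 then "exllamav3_exl2"
  else if mask &&& 16 ≠ 0 then "exllamav3_trellis"
  else "unknown"

-- Source B's _FORMAT_TABLE, built once from range(32)
def format_table : List String := (List.range 32).map format_for

def detect_trellis_format_py_alt (tensor_dict : List (String × Int)) : String :=
  let mask :=
    (PySem.List.slice (tensor_dict.map Prod.fst) none (some 20)).foldl
      (fun m k => m ||| key_mask k) 0
  -- _FORMAT_TABLE[mask]: mask < 32 always, so the default is never used
  format_table.getD mask "unknown"

-- ===== PRECONDITION & SPEC =====
def Spec_detect_trellis_format_py (tensor_dict : List (String × Int)) (out : String) : Prop := out = detect_trellis_format_py_alt tensor_dict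
instance (tensor_dict : List (String × Int)) (out : String) : Decidable (Spec_detect_trellis_format_py tensor_dict out) := by unfold Spec_detect_trellis_format_py; infer_instance

-- ===== CLAIM =====
def Claim_equal_detect_trellis_format_py : Prop := ∀ (tensor_dict : List (String × Int)), Dom_detect_trellis_format_py tensor_dict → Spec_detect_trellis_format_py tensor_dict (detect_trellis_format_py tensor_dict)

-- ===== LEMMAS AND PROOFS =====

-- canonical 5-bit value from five flags
def encodeMask (a b c d e : Bool) : Nat :=
  a.toNat + 2 * b.toNat + 4 * c.toNat + 8 * d.toNat + 16 * e.toNat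

theorem key_mask_eq (k : String) :
    key_mask k = encodeMask (PySem.Str.isIn "__indices" k) (PySem.Str.isIn ".qweight" k)
      (PySem.Str.isIn ".scale" k) (PySem.Str.isIn ".zero_point" k)
      (PySem.Str.isIn "trellis" (PySem.Str.lower k)) := by
  unfold key_mask
  simp only [List.foldl]
  generalize PySem.Str.isIn "__indices" k = a
  generalize PySem.Str.isIn ".qweight" k = b
  generalize PySem.Str.isIn ".scale" k = c
  generalize PySem.Str.isIn ".zero_point" k = d
  generalize PySem.Str.isIn "trellis" (PySem.Str.lower k) = e
  cases a <;> cases b <;> cases c <;> cases d <;> cases e <;> rfl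

theorem encode_lor (a b c d e a' b' c' d' e' : Bool) :
    encodeMask a b c d e ||| encodeMask a' b' c' d' e' =
      encodeMask (a || a') (b || b') (c || c') (d || d') (e || e') := by
  cases a <;> cases b <;> cases c <;> cases d <;> cases e <;>
    cases a' <;> cases b' <;> cases c' <;> cases d' <;> cases e' <;> rfl

theorem mask_fold (l : List String) (m : Nat) :
    l.foldl (fun m k => m ||| key_mask k) m =
      m ||| encodeMask (l.any (fun k => PySem.Str.isIn "__indices" k))
        (l.any (fun k => PySem.Str.isIn ".qweight" k))
        (l.any (fun k => PySem.Str.isIn ".scale" k))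
        (l.any (fun k => PySem.Str.isIn ".zero_point" k))
        (l.any (fun k => PySem.Str.isIn "trellis" (PySem.Str.lower k))) := by
  induction l generalizing m with
  | nil => simp [encodeMask]
  | cons k rest ih =>
    rw [List.foldl_cons, ih]
    simp only [List.any_cons, key_mask_eq, Nat.or_assoc, encode_lor]

theorem table_decode (a b c d e : Bool) :
    format_table.getD (encodeMask a b c d e) "unknown" =
      (if a then "metal_marlin"
       else if b then "exllamav3_gptq"
       else if c && d then "exllamav3_exl2"
       else if e then "exllamav3_trellis"
       else "unknown") := by
  cases a <;> cases b <;> cases c <;> cases d <;> cases e <;> rfl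

-- ===== VERDICT =====
theorem detect_trellis_format_py_spec : Claim_equal_detect_trellis_format_py := by
  intro tensor_dict _
  unfold Spec_detect_trellis_format_py detect_trellis_format_py detect_trellis_format_py_alt
  simp only [mask_fold, Nat.zero_or, table_decode]
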